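-- pv_equiv track=rewrite | github.com/okcd00/CDConfusor | src/input_sequence_manager.py | simpy
-- ===== SOURCE A (Python) =====
-- def simpy(pinyin):
--     # simplified input sequences from the pinyin
--     # simplify inputs with first char: xujiali -> [xjl, xujl, xujial]
--     # not that the original pinyin is not in the returned list
--     if isinstance(pinyin[0], list):
--         pinyin = [p[0] for p in pinyin]
--     input_sequences = []
--     for simp_idx, _ in enumerate(pinyin):
--         input_sequences.append(''.join(
--             [py[0] if idx >= simp_idx else py
--              for idx, py in enumerate(pinyin)]))
--     return input_sequences
-- ===== SOURCE B (Python) =====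
-- def simpy(pinyin):
--     # simplified input sequences from the pinyin (progressive simplification)
--     if isinstance(pinyin[0], list):
--         pinyin = [p[0] for p in pinyin]
--     abbr = ''.join(py[0] for py in pinyin)
--     out, prefix, rest = [], '', abbr
--     for py in pinyin:
--         out.append(prefix + rest)
--         prefix += py
--         rest = rest[1:]
--     return out
-- ===== Notes on version B (the rewrite author's own statement) =====
-- stated objective: simpler
-- what changed: B precomputes the abbreviation string once and sweeps a running (prefix, rest) pair over the syllables, replacing A's per-position index-comparison comprehension over the whole list.
import Mathlib
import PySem

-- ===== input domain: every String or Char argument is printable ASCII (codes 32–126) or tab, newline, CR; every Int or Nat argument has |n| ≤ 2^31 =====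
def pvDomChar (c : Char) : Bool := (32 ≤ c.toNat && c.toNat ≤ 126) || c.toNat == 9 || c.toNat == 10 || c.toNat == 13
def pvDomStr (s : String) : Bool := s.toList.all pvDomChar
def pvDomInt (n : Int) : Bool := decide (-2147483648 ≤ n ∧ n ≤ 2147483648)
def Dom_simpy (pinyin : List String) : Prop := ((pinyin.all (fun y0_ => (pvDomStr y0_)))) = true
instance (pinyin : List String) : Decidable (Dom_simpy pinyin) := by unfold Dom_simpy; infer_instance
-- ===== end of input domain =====

-- B precomputes the abbreviation word once and sweeps a running (prefix, rest) pair over the syllables, replacing A's per-position index-comparison comprehension (objective: simpler).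


-- py[0] of a Python string, as a (possibly empty) char list; Pre_ guarantees the syllable is nonempty
def pyHead (py : List Char) : List Char := ((PySem.List.pyGet? py 0).map ([·])).getD []

-- ===== PORT A =====
-- (the isinstance(pinyin[0], list) guard is identically false on List String inputs and is dropped;
--  strings are handled on the List Char side per the PySem convention)
def simpy (pinyin : List String) : List String :=
  ((PySem.List.enumerate (pinyin.map String.toList) 0).foldl (fun acc p =>
      acc ++ [PySem.Chars.join []
        ((PySem.List.enumerate (pinyin.map String.toList) 0).map (fun q =>
          if q.1 ≥ p.1 then pyHead q.2 else q.2))]) []).map String.ofList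

-- ===== PORT B =====
def simpy_alt (pinyin : List String) : List String :=
  ((pinyin.map String.toList).foldl
    (fun (st : List (List Char) × List Char × List Char) py =>
      (st.1 ++ [st.2.1 ++ st.2.2], st.2.1 ++ py, PySem.List.slice st.2.2 (some 1) none))
    ([], [], PySem.Chars.join [] ((pinyin.map String.toList).map pyHead))).1.map String.ofList

-- ===== PRECONDITION & SPEC =====
-- Pre_ excludes exactly the inputs on which the Python A raises IndexError: the empty list
-- (pinyin[0]) and any empty syllable (py[0]).
def Pre_simpy (pinyin : List String) : Prop := pinyin ≠ [] ∧ ∀ s ∈ pinyin, s ≠ ""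
instance (pinyin : List String) : Decidable (Pre_simpy pinyin) := by unfold Pre_simpy; infer_instance
def pvWitness_simpy : List String := ["xu", "jia", "li"]
def Spec_simpy (pinyin : List String) (out : List String) : Prop := out = simpy_alt pinyin
instance (pinyin : List String) (out : List String) : Decidable (Spec_simpy pinyin out) := by unfold Spec_simpy; infer_instance

-- ===== CLAIM (what is proved, stated in full; the proofs are below) =====
def Claim_equal_simpy : Prop := ∀ (pinyin : List String), Dom_simpy pinyin → Pre_simpy pinyin → Spec_simpy pinyin (simpy pinyin)

-- ===== LEMMAS AND PROOFS =====

-- common closed form of the k-th produced sequence: full first k syllables, then abbreviations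
def simpForm (ps : List (List Char)) (k : Nat) : List Char :=
  (ps.take k).flatten ++ ((ps.drop k).map pyHead).flatten

lemma join_nil_eq_flatten (parts : List (List Char)) :
    PySem.Chars.join [] parts = parts.flatten := by
  simp only [PySem.Chars.join, List.intercalate]
  induction parts with
  | nil => rfl
  | cons p ps ih =>
    cases ps with
    | nil => simp
    | cons q qs => simp_all [List.intersperse]

lemma pyHead_of_ne_nil (p : List Char) (h : p ≠ []) :
    pyHead p = [p.head h] := by
  cases p with
  | nil => exact absurd rfl h
  | cons c cs => simp [pyHead]

-- A's inner comprehension: below the threshold keep the syllable, from it on its head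
lemma inner_eq (ps : List (List Char)) (s i : Int) :
    (PySem.List.enumerate ps s).map (fun q => if q.1 ≥ i then pyHead q.2 else q.2)
      = (ps.take (i - s).toNat) ++ ((ps.drop (i - s).toNat).map pyHead) := by
  induction ps generalizing s with
  | nil => simp
  | cons p ps ih =>
    rw [PySem.List.enumerate_cons]
    by_cases h : s ≥ i
    · have h0 : (i - s).toNat = 0 := by omega
      have h1 : (i - (s + 1)).toNat = 0 := by omega
      simp only [List.map_cons, if_pos h, ih (s + 1), h0, h1, List.take_zero,
        List.drop_zero, List.nil_append, List.map_cons]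
    · have h0 : (i - s).toNat = (i - (s + 1)).toNat + 1 := by omega
      simp only [List.map_cons, if_neg (by omega : ¬ s ≥ i), ih (s + 1), h0,
        List.take_succ_cons, List.drop_succ_cons, List.cons_append]

-- A's outer loop as a map of the closed form
lemma simpy_eq_form (pinyin : List String) :
    simpy pinyin = ((List.range (pinyin.map String.toList).length).map
      (fun k => simpForm (pinyin.map String.toList) k)).map String.ofList := by
  unfold simpy
  rw [PySem.List.foldl_append_singleton_eq_map]
  congr 1
  have key : ∀ (t : List (List Char)) (s : Int),
      (PySem.List.enumerate t s).map (fun p => PySem.Chars.join []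
        ((PySem.List.enumerate (pinyin.map String.toList) 0).map
          (fun q => if q.1 ≥ p.1 then pyHead q.2 else q.2)))
      = (List.range t.length).map
          (fun (k : Nat) => PySem.Chars.join []
            ((PySem.List.enumerate (pinyin.map String.toList) 0).map
              (fun q => if q.1 ≥ s + (k : Int) then pyHead q.2 else q.2))) := by
    intro t
    induction t with
    | nil => intro s; simp
    | cons x xs ih =>
      intro s
      rw [PySem.List.enumerate_cons, List.map_cons, ih (s + 1)]
      simp only [List.length_cons, List.range_succ_eq_map, List.map_cons, List.map_map]
      congr 1
      · simp
      · apply List.map_congr_left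
        intro k _
        have hk : s + 1 + (k : Int) = s + ((k + 1 : Nat) : Int) := by push_cast; ring
        simp [Function.comp, hk]
  rw [key (pinyin.map String.toList) 0]
  simp only [List.nil_append]
  apply List.map_congr_left
  intro k _
  rw [inner_eq (pinyin.map String.toList) 0 (0 + (k : Int)), join_nil_eq_flatten,
    List.flatten_append]
  simp [simpForm]

-- B's loop invariant: with rest = remaining abbreviations, the fold emits the closed forms
lemma simpy_alt_loop (ps : List (List Char)) (h : ∀ p ∈ ps, p ≠ [])
    (out : List (List Char)) (pref : List Char) :
    (ps.foldl
      (fun (st : List (List Char) × List Char × List Char) py =>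
        (st.1 ++ [st.2.1 ++ st.2.2], st.2.1 ++ py, PySem.List.slice st.2.2 (some 1) none))
      (out, pref, (ps.map pyHead).flatten)).1
    = out ++ (List.range ps.length).map (fun k => pref ++ simpForm ps k) := by
  induction ps generalizing out pref with
  | nil => simp
  | cons p ps ih =>
    have hp : p ≠ [] := h p (by simp)
    have hrest : ∀ p' ∈ ps, p' ≠ [] := fun p' hp' => h p' (by simp [hp'])
    rw [List.foldl_cons]
    have hhead : pyHead p = [p.head hp] := pyHead_of_ne_nil p hp
    have htail : PySem.List.slice (((p :: ps).map pyHead).flatten) (some 1) none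
        = (ps.map pyHead).flatten := by
      rw [PySem.List.slice_from_one]
      simp [hhead]
    simp only [htail]
    rw [ih hrest]
    simp only [List.length_cons, List.range_succ_eq_map, List.map_cons, List.map_map,
      List.flatten_cons, List.append_assoc, List.singleton_append]
    congr 1
    rw [List.cons_eq_cons]
    refine ⟨by simp [simpForm], ?_⟩
    apply List.map_congr_left
    intro k _
    simp [simpForm, Function.comp, List.append_assoc]

-- ===== VERDICT (by name: the statement is the Claim_ definition above) =====
theorem simpy_spec : Claim_equal_simpy := by
  intro pinyin _ hpre
  unfold Spec_simpy simpy_alt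
  rw [simpy_eq_form]
  have hne : ∀ p ∈ pinyin.map String.toList, p ≠ [] := by
    intro p hp
    obtain ⟨s, hs, rfl⟩ := List.mem_map.mp hp
    have := hpre.2 s hs
    simp only [ne_eq, String.toList_eq_nil_iff]
    exact this
  rw [join_nil_eq_flatten]
  rw [simpy_alt_loop (pinyin.map String.toList) hne [] []]
  simp
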